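/- GENERATED by tools/from_farm_form.py from prooffarm-gif/accepted/DGifSlurp.3/Lemmas.lean (a worked proof of the farm's unit `DGifSlurp.3`,
   accepted by the verdict) — do not edit. -/
import Gif.Spec.Units.DGifSlurp_3
import Gif.Spec.AllSegs

/-!
  Lemmas for the unit `DGifSlurp.3` (segment 3 of `DGifSlurp`, dgif_lib.c:1203: `if (DGifGetImageDesc(GifFile) == GIF_ERROR)`;
  10A6F9H … 10A70BH | 10A8EDH): the segment is walked in TWO STEPS that meet at the call's return address 10A701H (`ret3`), with a
  private assertion there.

      seg3_last_of_imgs      pure: GIF_OK of DGifGetImageDesc gives THE LAST counted image of `IM`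
      seg3_complete_of_imgs  pure: GIF_ERROR of DGifGetImageDesc keeps every counted image complete
      seg3_env_at_call       `Env.at_call` (Gif/Spec/FrameCarry.lean) for the ghosts that change (`Hc`, `Fc`)
      seg3_AtRet3            the assertion at `ret3`: `At` for the post's heap and forest + the result in `eax` and what it means
      seg3_call              10A6F9H … the call of DGifGetImageDesc … 10A701H: `Rec` → `seg3_AtRet3`
      seg3_at_step           `At` over a step that stores nothing
      seg3_tail              10A701H … 10A70BH (GIF_OK: `IM`) | 10A8EDH (GIF_ERROR: `Exit`)
-/

open X86 X86.User Asan ProgX.Base ProgX.Base.Spec Gif.Spec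

set_option maxRecDepth 4000
set_option maxHeartbeats 4000000

namespace Gif.Spec.DGifSlurp_3

/-- **GIF_OK of DGifGetImageDesc, as the exit assertion `IM` says it**: one more counted image `g` without raster and without extension
list behind the complete images of `Fc` is THE LAST counted image of `F'`. -/
theorem seg3_last_of_imgs (Fc F' : Forest) (g : Img) (hc : Fc.Complete) (hi : F'.imgs = Fc.imgs ++ [g])
    (hr : g.raster = none) (hx : g.ext = none) :
    ∃ (s : Saved) (init : List Img) (g : Img), DGifSlurp.Last F' s init g ∧ g.raster = none := by
  have hdone := (DGifSlurp.complete_iff_imgs Fc).mp hc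
  cases hs : F'.saved with
  | none =>
    unfold Forest.imgs at hi
    rw [hs] at hi
    simp only at hi
    exact absurd hi.symm (by simp only [List.append_eq_nil_iff, List.cons_ne_self, and_false, not_false_eq_true])
  | some s =>
    have hi' : s.imgs = Fc.imgs ++ [g] := by
      rw [← hi]
      unfold Forest.imgs
      rw [hs]
    exact ⟨s, Fc.imgs, g, ⟨hs, hi', hdone, hx⟩, hr⟩

/-- **GIF_ERROR of DGifGetImageDesc**: the same counted images: every one complete still. -/
theorem seg3_complete_of_imgs (Fc F' : Forest) (hc : Fc.Complete) (hi : F'.imgs = Fc.imgs) : F'.Complete := by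
  rw [DGifSlurp.complete_iff_imgs] at hc ⊢
  rw [hi]
  exact hc


/-- **`Env` AT THE ENTRY OF A CALLEE, FOR THE PRESENT HEAP AND FOREST** (`Env.at_call` of Gif/Spec/FrameCarry.lean with the ghosts
that change: `Hc` at the place of the entry's heap `H`, the forest `Fc`): `henv` is the ENTRY's environment (the static facts of
`HeapPre`, the context, where the cursor is), `hinv` / `hok` the body's invariants (`At.inv`, `At.ok`), and the callee's entry state
`s` differs from `mem` by stack stores below `top` (the pushed return address). -/
theorem seg3_env_at_call {H Hc : Heap} {rest : List Obj} {frames : List (Nat × FrameLayout)} {F Fc : Forest} {R : Rd}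
    {e s : State} {base top lo : Nat} {Fl : FrameLayout} {mem : Mem} (henv : Env H rest frames F R e)
    (hreg : SameRegion H Hc)
    (hinv : HeapInv Hc rest ((base, Fl) :: frames) top mem) (hok : GifOK Hc Fc R mem)
    (hs : Mem.SameExcept [⟨lo, top⟩] mem s.mem) (hlo : 0x700000 ≤ lo) (htop : top ≤ (e.reg .rsp).toNat + 8)
    (hsp : (s.reg .rsp).toNat + 8 ≤ top) (h8 : (s.reg .rsp).toNat % 8 = 0) (hlo' : 0x700000 ≤ (s.reg .rsp).toNat + 8) :
    Env Hc rest ((base, Fl) :: frames) Fc R s := by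
  have hcur := henv.ctx.cursor_range henv.heap.inv.shadow
  have hhi := hinv.shadow.stack.hi
  have hoff := hinv.heap.offStack
  have hroom := hinv.heap.room
  have hun : ShadowUntouched mem s.mem := by
    apply hs.eqOn
    intro w hw
    have e := List.mem_singleton.mp hw
    rw [e]
    simp only
    omega
  have hinv' : HeapInv Hc rest ((base, Fl) :: frames) ((s.reg .rsp).toNat + 8) s.mem := by
    refine (hinv.sameExcept hun hs ?_).lower hsp (by omega) hlo'
    intro w hw
    have e := List.mem_singleton.mp hw
    rw [e]
    left
    simp only
    omega
  refine ⟨⟨hinv', hreg.1.trans henv.heap.base, hreg.2.trans henv.heap.limit, henv.heap.text, henv.heap.offText⟩,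
    henv.ctx.push base Fl, ?_⟩
  apply hok.sameExcept hinv.heap ⟨hcur.1, hcur.2.1⟩ hs
  intro w hw
  have e := List.mem_singleton.mp hw
  rw [e]
  apply Loose.stack hinv.heap
  · simp only
    omega
  · simp only
    omega
  · simp only
    omega


/-- **At 10A701H (ret3), `DGifGetImageDesc(gif)` has returned**: `At` for the heap `H'` and the forest `F'` of its post; its result in
`eax` (GIF_OK = 1 or GIF_ERROR = 0) and what each value means, in the form the two exit assertions ask: GIF_OK: the LZW field
ranges and the last counted image of `F'` (no raster, no extension list); GIF_ERROR: every counted image of `F'` complete. The reader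
did not go back: `rem R v.mem < m` still. -/
structure seg3_AtRet3 (H : Heap) (rest : List Obj) (frames : List (Nat × FrameLayout)) (F : Forest) (R : Rd) (H' : Heap)
    (F' : Forest) (m : Nat) (u₀ e : State) (ret : Word) (v : State) : Prop where
  at_ : DGifSlurp.At Gif.L.DGifSlurp.ret3 H rest frames F R H' F' u₀ e ret v
  res : IsBool v
  ok1 : (v.reg .rax).toNat = 1 →
    LZOK v.mem F.pv ∧ ∃ (s : Saved) (init : List Img) (g : Img), DGifSlurp.Last F' s init g ∧ g.raster = none
  ok0 : (v.reg .rax).toNat = 0 → F'.Complete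
  lt : rem R v.mem < m

/-- **10A6F9H … the call of DGifGetImageDesc … 10A701H (ret3)** (dgif_lib.c:1203 `DGifGetImageDesc(GifFile)`): `rdi = rbp = gif`. -/
theorem seg3_call (Lay : Layout) (hLay : Lay.hi = 0x1000000) (μ : Microarch) (hμ : UserX.MicroOK μ) (u₀ : State)
    (hcode : HasCodeNat Lay u₀ Gif.L.DGifSlurp.entry Gif.Code.code_DGifSlurp.nat Gif.L.DGifSlurp.size)
    (H : Heap) (rest : List Obj) (frames : List (Nat × FrameLayout)) (F : Forest) (R : Rd) (Hc : Heap) (Fc : Forest) (m : Nat)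
    (e : State) (ret : Word)
    (h_DGifGetImageDesc : Calls Lay μ ProgX.Base.WayInv (ProgX.Base.conv u₀) Gif.L.DGifGetImageDesc.entry
      (Gif.Spec.DGifGetImageDesc.spec Hc rest (DGifSlurp.framesIn frames e) Fc R))
    (v : State) (hat : DGifSlurp.Rec Gif.L.DGifSlurp.at_10a6f9 H rest frames F R Hc Fc m u₀ e ret v) :
    ReachVia Lay μ ProgX.Base.WayInv v (fun w =>
      ∃ (H' : Heap) (F' : Forest), seg3_AtRet3 H rest frames F R H' F' m u₀ e ret w) := by
  -- THE PRELUDE: the entry assertion `Rec` = `At` + every counted image complete + the round consumed input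
  obtain ⟨hAt, hcomplete, hlt⟩ := hat
  obtain ⟨hcore, hregion, hgif, hpv, hinv, hok⟩ := hAt
  have he := hcore.entry
  v_entry he
  obtain ⟨henv, hrdi, _⟩ := hcore.pre
  -- what the walker reads of a segment's entry state
  have w_rip := hcore.rip
  have c_rsp : v.reg .rsp = e.reg .rsp - 152 := hcore.rsp
  have c_rbp : v.reg .rbp = e.reg .rdi := hcore.rbp
  have w_kept : RegsKept [.rsp] v v := RegsKept.refl _ _
  have w_eq : Mem.EqOn ProgX.Base.L.textLo ProgX.Base.L.textHi u₀.mem v.mem := ProgX.Base.conv_code_eqOn hcore.code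
  have hdf := (show abiInv _ from hcore.abi).1
  have hmx := (show abiInv _ from hcore.abi).2
  have hsse := ProgX.Base.sseOK_of_abiInv hcore.abi
  -- the slots and the footprint that `Core` at the exit states again
  have k_r15 : v.mem.readLE (e.reg .rsp - 8) 8 = (e.reg .r15).toNat := hcore.slot_r15
  have k_r14 : v.mem.readLE (e.reg .rsp - 16) 8 = (e.reg .r14).toNat := hcore.slot_r14
  have k_r13 : v.mem.readLE (e.reg .rsp - 24) 8 = (e.reg .r13).toNat := hcore.slot_r13
  have k_r12 : v.mem.readLE (e.reg .rsp - 32) 8 = (e.reg .r12).toNat := hcore.slot_r12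
  have k_rbp : v.mem.readLE (e.reg .rsp - 40) 8 = (e.reg .rbp).toNat := hcore.slot_rbp
  have k_rbx : v.mem.readLE (e.reg .rsp - 48) 8 = (e.reg .rbx).toNat := hcore.slot_rbx
  have k_ra : UInt64.ofNat (v.mem.readLE (e.reg .rsp) 8) = ret := hcore.slot_ra
  have hsame : Mem.SameExcept
    [⟨(e.reg .rsp).toNat - 848, (e.reg .rsp).toNat⟩,
     shadowSpan ((e.reg .rsp).toNat - 152) ((e.reg .rsp).toNat - 56),
     ⟨0x800000, 0x1000020⟩,
     ⟨R.cur, R.cur + 8⟩] e.mem v.mem := hcore.same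
  -- where the cursor is, as numbers
  have hcur := henv.ctx.cursor_range henv.heap.inv.shadow
  -- THE WALK, to the call's return address
  u_walk hcode [hμ.vendor] until [Gif.L.DGifSlurp.ret3] span [ProgX.Base.L.textLo, ProgX.Base.L.textHi] side (v_side)
  case call_inv =>
    v_inv
  case pre_10a6fc =>
    -- DGifGetImageDesc'S PRECONDITION. The environment for the PRESENT heap and forest, the own frame in front of the frame
    -- list: only the return address was pushed since `v`
    have hs : Mem.SameExcept [⟨(e.reg .rsp).toNat - 848, (e.reg .rsp).toNat - 152⟩] v.mem s_10a6fc.mem := by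
      rw [w_mem]
      u_same
    have henv' : Env Hc rest (DGifSlurp.framesIn frames e) Fc R s_10a6fc := by
      refine seg3_env_at_call henv hregion hinv hok hs (by omega) (by omega) ?_ ?_ ?_
      · rw [w_rsp]
        u_omega
      · rw [w_rsp]
        u_omega
      · rw [w_rsp]
        u_omega
    refine ⟨henv', ?_⟩
    rw [w_rdi, hgif]
    exact hrdi
  -- 10A701H (ret3): DGifGetImageDesc HAS RETURNED. Its post: a heap `H'` and a forest `F'`
  obtain ⟨H', F', hback, hsameF, hbool, hres1, hres0⟩ := w_post
  -- the reader at the callee's entry is where it was at `v`: only the return address was pushed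
  have hs0 : Mem.SameExcept [⟨(e.reg .rsp).toNat - 848, (e.reg .rsp).toNat - 152⟩] v.mem s_10a6fc.mem := by
    rw [w_mem_10a6fc]
    u_same
  have hrem0 : rem R s_10a6fc.mem = rem R v.mem := by
    apply rem_sameExcept hs0 (by omega)
    intro w hw
    have e := List.mem_singleton.mp hw
    rw [e]
    simp only
    omega
  have e_top : (s_10a6fc.reg .rsp).toNat + 8 = (e.reg .rsp).toNat - 152 := by
    rw [w_rsp_10a6fc]
    u_omega
  -- the callee's footprint in terms of `v` (`w_same : SameExcept […] v.mem s_10a6fcr.mem`)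
  v_after_call w_rsp_10a6fc w_mem_10a6fc
  -- THE SLOTS AND THE RETURN ADDRESS, over the pushed return address (first step) and through DGifGetImageDesc's footprint (second
  -- step: its stack below, the heap's region and shadow, the cursor)
  have hp_r15 : s_10a6fc.mem.readLE (e.reg .rsp - 8) 8 = (e.reg .r15).toNat := by
    rw [w_mem_10a6fc]
    u_frame k_r15
  rw [w_mem_10a6fc] at hp_r15
  have hs_r15 : s_10a6fcr.mem.readLE (e.reg .rsp - 8) 8 = (e.reg .r15).toNat := by u_frame hp_r15
  have hp_r14 : s_10a6fc.mem.readLE (e.reg .rsp - 16) 8 = (e.reg .r14).toNat := by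
    rw [w_mem_10a6fc]
    u_frame k_r14
  rw [w_mem_10a6fc] at hp_r14
  have hs_r14 : s_10a6fcr.mem.readLE (e.reg .rsp - 16) 8 = (e.reg .r14).toNat := by u_frame hp_r14
  have hp_r13 : s_10a6fc.mem.readLE (e.reg .rsp - 24) 8 = (e.reg .r13).toNat := by
    rw [w_mem_10a6fc]
    u_frame k_r13
  rw [w_mem_10a6fc] at hp_r13
  have hs_r13 : s_10a6fcr.mem.readLE (e.reg .rsp - 24) 8 = (e.reg .r13).toNat := by u_frame hp_r13
  have hp_r12 : s_10a6fc.mem.readLE (e.reg .rsp - 32) 8 = (e.reg .r12).toNat := by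
    rw [w_mem_10a6fc]
    u_frame k_r12
  rw [w_mem_10a6fc] at hp_r12
  have hs_r12 : s_10a6fcr.mem.readLE (e.reg .rsp - 32) 8 = (e.reg .r12).toNat := by u_frame hp_r12
  have hp_rbp : s_10a6fc.mem.readLE (e.reg .rsp - 40) 8 = (e.reg .rbp).toNat := by
    rw [w_mem_10a6fc]
    u_frame k_rbp
  rw [w_mem_10a6fc] at hp_rbp
  have hs_rbp : s_10a6fcr.mem.readLE (e.reg .rsp - 40) 8 = (e.reg .rbp).toNat := by u_frame hp_rbp
  have hp_rbx : s_10a6fc.mem.readLE (e.reg .rsp - 48) 8 = (e.reg .rbx).toNat := by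
    rw [w_mem_10a6fc]
    u_frame k_rbx
  rw [w_mem_10a6fc] at hp_rbx
  have hs_rbx : s_10a6fcr.mem.readLE (e.reg .rsp - 48) 8 = (e.reg .rbx).toNat := by u_frame hp_rbx
  have hp_ra : UInt64.ofNat (s_10a6fc.mem.readLE (e.reg .rsp) 8) = ret := by
    rw [w_mem_10a6fc]
    u_frame k_ra
  rw [w_mem_10a6fc] at hp_ra
  have hs_ra : UInt64.ofNat (s_10a6fcr.mem.readLE (e.reg .rsp) 8) = ret := by u_frame hp_ra
  -- the footprint since the entry: DGifGetImageDesc's windows lie inside the function's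
  have hsame1 : Mem.SameExcept
    [⟨(e.reg .rsp).toNat - 848, (e.reg .rsp).toNat⟩,
     shadowSpan ((e.reg .rsp).toNat - 152) ((e.reg .rsp).toNat - 56),
     ⟨0x800000, 0x1000020⟩,
     ⟨R.cur, R.cur + 8⟩] e.mem s_10a6fcr.mem := by u_same
  -- the heap's invariant comes back with the clean stack at the callee's `rsp + 8` = the body's `rsp`
  have hinv1 : HeapInv H' rest (DGifSlurp.framesIn frames e) ((e.reg .rsp).toNat - 152) s_10a6fcr.mem := by
    rw [← e_top]
    exact hback.inv
  -- the reader did not go back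
  have hrem1 : rem R s_10a6fcr.mem ≤ rem R v.mem := by
    rw [← hrem0]
    exact hback.rem
  -- THE EXIT ASSERTION: `Core` at `ret3` …
  have hcore1 : DGifSlurp.Core Gif.L.DGifSlurp.ret3 H rest frames F R u₀ e ret s_10a6fcr := {
    entry := hcore.entry
    pre := hcore.pre
    rip := w_rip
    rsp := w_rsp
    rbp := (w_kept.get .rbp rfl).trans c_rbp
    r14 := (w_kept.get .r14 rfl).trans hcore.r14
    slot_r15 := hs_r15
    slot_r14 := hs_r14
    slot_r13 := hs_r13
    slot_r12 := hs_r12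
    slot_rbp := hs_rbp
    slot_rbx := hs_rbx
    slot_ra := hs_ra
    rem := Nat.le_trans hrem1 hcore.rem
    same := hsame1
    code := w_code
    abi := w_inv
  }
  -- … `At` for the heap and the forest of DGifGetImageDesc's post …
  have hAt1 : DGifSlurp.At Gif.L.DGifSlurp.ret3 H rest frames F R H' F' u₀ e ret s_10a6fcr := {
    core := hcore1
    region := hregion.trans hback.region
    gif := hsameF.1.trans hgif
    pv := hsameF.2.1.trans hpv
    inv := hinv1
    ok := hback.ok
  }
  -- … and the result in `eax` with what each value means
  refine ReachVia.done ⟨H', F', ?_⟩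
  exact {
    at_ := hAt1
    res := hbool
    ok1 := by
      intro h1
      obtain ⟨hlz, g, hi, hr, hx⟩ := hres1 h1
      rw [hpv] at hlz
      exact ⟨hlz, seg3_last_of_imgs Fc F' g hcomplete hi hr hx⟩
    ok0 := by
      intro h0
      exact seg3_complete_of_imgs Fc F' hcomplete (hres0 h0)
    lt := Nat.lt_of_le_of_lt hrem1 hlt
  }

/-- **A step without a store inside the body**: `At` moves from the cut `c` at `v` to the cut `c'` at a state `s` with the same memory,
the same `rsp`, `rbp`, `r14`, and the ABI's invariant (DF, MXCSR). -/
theorem seg3_at_step {c c' : Word} {H : Heap} {rest : List Obj} {frames : List (Nat × FrameLayout)} {F : Forest} {R : Rd}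
    {Hc : Heap} {Fc : Forest} {u₀ e : State} {ret : Word} {v s : State}
    (hat : DGifSlurp.At c H rest frames F R Hc Fc u₀ e ret v) (hrip : s.rip = c') (hmem : s.mem = v.mem)
    (hrsp : s.reg .rsp = v.reg .rsp) (hrbp : s.reg .rbp = v.reg .rbp) (hr14 : s.reg .r14 = v.reg .r14)
    (habi : (conv u₀).inv s) :
    DGifSlurp.At c' H rest frames F R Hc Fc u₀ e ret s := by
  obtain ⟨hcore, hregion, hgif, hpv, hinv, hok⟩ := hat
  have hcore1 : DGifSlurp.Core c' H rest frames F R u₀ e ret s := {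
    entry := hcore.entry
    pre := hcore.pre
    rip := hrip
    rsp := hrsp.trans hcore.rsp
    rbp := hrbp.trans hcore.rbp
    r14 := hr14.trans hcore.r14
    slot_r15 := by
      rw [hmem]
      exact hcore.slot_r15
    slot_r14 := by
      rw [hmem]
      exact hcore.slot_r14
    slot_r13 := by
      rw [hmem]
      exact hcore.slot_r13
    slot_r12 := by
      rw [hmem]
      exact hcore.slot_r12
    slot_rbp := by
      rw [hmem]
      exact hcore.slot_rbp
    slot_rbx := by
      rw [hmem]
      exact hcore.slot_rbx
    slot_ra := by
      rw [hmem]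
      exact hcore.slot_ra
    rem := by
      rw [hmem]
      exact hcore.rem
    same := by
      rw [hmem]
      exact hcore.same
    code := by
      rw [hmem]
      exact hcore.code
    abi := habi
  }
  exact {
    core := hcore1
    region := hregion
    gif := hgif
    pv := hpv
    inv := by
      rw [hmem]
      exact hinv
    ok := by
      rw [hmem]
      exact hok
  }

/-- **10A701H (ret3) … 10A70BH | 10A8EDH** (dgif_lib.c:1203 `if (DGifGetImageDesc(GifFile) == GIF_ERROR)`): `ebx = eax`,
`test eax, eax ; je`: GIF_ERROR: to the epilogue, every counted image complete; GIF_OK: to 10A70BH with the last counted image. No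
store: the memory is the one at `ret3`. -/
theorem seg3_tail (Lay : Layout) (hLay : Lay.hi = 0x1000000) (μ : Microarch) (hμ : UserX.MicroOK μ) (u₀ : State)
    (hcode : HasCodeNat Lay u₀ Gif.L.DGifSlurp.entry Gif.Code.code_DGifSlurp.nat Gif.L.DGifSlurp.size)
    (H : Heap) (rest : List Obj) (frames : List (Nat × FrameLayout)) (F : Forest) (R : Rd) (H' : Heap) (F' : Forest) (m : Nat)
    (e : State) (ret : Word)
    (v : State) (hat : seg3_AtRet3 H rest frames F R H' F' m u₀ e ret v) :
    ReachVia Lay μ ProgX.Base.WayInv v (fun w =>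
      (∃ (H' : Heap) (F' : Forest), DGifSlurp.IM H rest frames F R H' F' m u₀ e ret w) ∨
      DGifSlurp.Exit H rest frames F R u₀ e ret w) := by
  -- THE PRELUDE: the private assertion at `ret3`
  obtain ⟨hAt, hbool, hres1, hres0, hlt⟩ := hat
  have hcore := hAt.core
  have he := hcore.entry
  v_entry he
  have w_rip := hcore.rip
  have c_rsp : v.reg .rsp = e.reg .rsp - 152 := hcore.rsp
  -- `eax` as a variable `z` (the branch fact of `test eax, eax` speaks of it)
  obtain ⟨z, c_rax⟩ : ∃ z, v.reg .rax = z := ⟨_, rfl⟩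
  unfold IsBool at hbool
  rw [c_rax] at hbool hres1 hres0
  have w_kept : RegsKept [.rsp] v v := RegsKept.refl _ _
  have w_eq : Mem.EqOn ProgX.Base.L.textLo ProgX.Base.L.textHi u₀.mem v.mem := ProgX.Base.conv_code_eqOn hcore.code
  have hdf := (show abiInv _ from hcore.abi).1
  have hmx := (show abiInv _ from hcore.abi).2
  have hsse := ProgX.Base.sseOK_of_abiInv hcore.abi
  -- THE WALK, both arms
  u_walk hcode [hμ.vendor] until [Gif.L.DGifSlurp.at_10a70b, Gif.L.DGifSlurp.at_10a8ed]
    span [ProgX.Base.L.textLo, ProgX.Base.L.textHi] side (v_side)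
  · -- 10A8EDH FROM 10A705H: `eax = 0`, GIF_ERROR: to the epilogue with the heap and the forest of DGifGetImageDesc's post
    have hz : z.toNat = 0 := by
      rw [toNat_part32] at hbr_10a705
      omega
    have habi : (conv u₀).inv s_10a705 := by
      refine ProgX.Base.abiInv_of ?_ ?_
      · rw [w_flags]
        simp only [X86.User.df_setStatus]
        exact hdf
      · rw [w_mxcsr]
        exact hmx
    have hAt1 : DGifSlurp.At Gif.L.DGifSlurp.at_10a8ed H rest frames F R H' F' u₀ e ret s_10a705 :=
      seg3_at_step hAt w_rip w_mem (w_rsp.trans c_rsp.symm) (w_kept.get .rbp rfl) (w_kept.get .r14 rfl) habi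
    refine ReachVia.done (Or.inr ⟨H', F', ?_⟩)
    exact {
      at_ := hAt1
      complete := hres0 hz
    }
  · -- 10A70BH FROM 10A705H: `eax = 1`, GIF_OK: one more counted image, without raster and without extension list
    have hz : z.toNat = 1 := by
      rw [toNat_part32] at hbr_10a705
      omega
    have habi : (conv u₀).inv s_10a705 := by
      refine ProgX.Base.abiInv_of ?_ ?_
      · rw [w_flags]
        simp only [X86.User.df_setStatus]
        exact hdf
      · rw [w_mxcsr]
        exact hmx
    have hAt1 : DGifSlurp.At Gif.L.DGifSlurp.at_10a70b H rest frames F R H' F' u₀ e ret s_10a705 :=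
      seg3_at_step hAt w_rip w_mem (w_rsp.trans c_rsp.symm) (w_kept.get .rbp rfl) (w_kept.get .r14 rfl) habi
    obtain ⟨hlz, hlast⟩ := hres1 hz
    refine ReachVia.done (Or.inl ⟨H', F', ?_⟩)
    exact {
      at_ := hAt1
      lz := by
        rw [w_mem]
        exact hlz
      last := hlast
      lt := by
        rw [w_mem]
        exact hlt
    }

end Gif.Spec.DGifSlurp_3
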